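-- pv_equiv track=rewrite | github.com/naivelamb/leetcode | 1034_ColoringABorder.py | colorBorder
-- ===== SOURCE A (Python) =====
-- import collections
--
-- def colorBorder(grid, r0, c0, color):
--     m, n = len(grid), len(grid[0])
--     ref_color = grid[r0][c0]
--     border = []
--     queue = collections.deque([(r0, c0)])
--     visited = {(r0, c0)}
--     while queue:
--         x, y = queue.popleft()
--         nei = []
--         for dx, dy in [(1, 0), (0, 1), (-1, 0), (0, -1)]:
--             new_x, new_y = x + dx, y + dy
--             if 0 <= new_x < m and 0 <= new_y < n:
--                 nei.append((new_x, new_y))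
--         cnt = 0
--         for a, b in nei:
--             if grid[a][b] == ref_color: # same component
--                 cnt += 1
--                 if (a, b) not in visited:
--                     visited.add((a, b))
--                     queue.append((a, b))
--
--         if cnt != 4: # (x, y) is border
--             border.append((x, y))
--
--     for x, y in border:
--         grid[x][y] = color
--     return grid
-- ===== SOURCE B (Python) =====
-- def colorBorder(grid, r0, c0, color):
--     m, n = len(grid), len(grid[0])
--     ref = grid[r0][c0]
--     comp = {(r0, c0)}
--     stack = [(r0, c0)]
--     while stack:
--         x, y = stack.pop()
--         for a, b in ((x + 1, y), (x - 1, y), (x, y + 1), (x, y - 1)):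
--             if 0 <= a < m and 0 <= b < n and grid[a][b] == ref and (a, b) not in comp:
--                 comp.add((a, b))
--                 stack.append((a, b))
--
--     def is_border(x, y):
--         return any(not (0 <= a < m and 0 <= b < n and grid[a][b] == ref)
--                    for a, b in ((x + 1, y), (x - 1, y), (x, y + 1), (x, y - 1)))
--
--     border = [p for p in comp if is_border(*p)]
--     for x, y in border:
--         grid[x][y] = color
--     return grid
-- ===== Notes on version B (the rewrite author's own statement) =====
-- stated objective: alternative
-- what changed: A computes the border inside a single BFS (deque + per-cell neighbour count interleaved with the traversal); B separates the phases: an explicit-stack flood fill that only collects the component, then a separate per-cell neighbour scan over that component to pick the border cells, then the deferred recoloring writes.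
-- outside the precondition, e.g. on colorBorder([[1, 2], [3]], 0, 0, 5): A returns [[5, 2], [3]], B returns [[5, 2], [3]]
import Mathlib
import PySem

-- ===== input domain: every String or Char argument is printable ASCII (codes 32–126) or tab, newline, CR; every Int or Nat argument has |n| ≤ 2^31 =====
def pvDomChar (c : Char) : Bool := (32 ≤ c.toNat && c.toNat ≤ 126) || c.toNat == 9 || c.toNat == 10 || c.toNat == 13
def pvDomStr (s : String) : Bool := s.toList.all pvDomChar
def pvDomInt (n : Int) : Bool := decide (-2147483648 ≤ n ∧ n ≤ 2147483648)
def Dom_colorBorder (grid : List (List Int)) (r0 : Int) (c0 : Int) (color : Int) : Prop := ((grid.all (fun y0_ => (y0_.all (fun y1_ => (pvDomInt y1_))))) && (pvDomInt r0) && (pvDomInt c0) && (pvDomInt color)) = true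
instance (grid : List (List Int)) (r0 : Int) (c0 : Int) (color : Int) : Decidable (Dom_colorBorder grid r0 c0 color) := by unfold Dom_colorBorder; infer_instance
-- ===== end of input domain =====

-- B (alternative decomposition, same cost): A computes the border *during* a single BFS
-- (deque + interleaved neighbour count); B separates the phases: an explicit-stack flood fill that
-- only collects the component, then a per-cell neighbour scan over that component to pick the
-- border cells, then the same deferred recoloring writes as A (B mutates grid in place like A).

-- ===== PORT A =====
-- grid[a][b] for indices the Python code only uses in range (guards / Pre_ ensure in-range access)
def pvGG (grid : List (List Int)) (a b : Int) : Int :=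
  PySem.List.pyGetD (PySem.List.pyGetD grid a []) b 0

-- the `nei` list: in-bounds neighbours, in A's direction order
def pvNeiA (m n x y : Int) : List (Int × Int) :=
  [((1:Int), (0:Int)), (0, 1), (-1, 0), (0, -1)].foldl
    (fun acc d =>
      if 0 ≤ x + d.1 ∧ x + d.1 < m ∧ 0 ≤ y + d.2 ∧ y + d.2 < n
      then acc ++ [(x + d.1, y + d.2)] else acc) []

-- the inner `for a, b in nei` loop; state = (cnt, visited, appended-to-queue)
def pvScanA (grid : List (List Int)) (ref : Int) (nei : List (Int × Int))
    (st : Int × PySem.Set (Int × Int) × List (Int × Int)) :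
    Int × PySem.Set (Int × Int) × List (Int × Int) :=
  nei.foldl
    (fun st q =>
      if pvGG grid q.1 q.2 = ref then
        if q ∈ st.2.1 then (st.1 + 1, st.2.1, st.2.2)
        else (st.1 + 1, PySem.Set.add st.2.1 q, st.2.2 ++ [q])
      else st) st

-- the `while queue` BFS; fuel 2*m*n+1 is a totalization bound (proven sufficient under Pre_)
def pvBfsA (grid : List (List Int)) (ref m n : Int) :
    Nat → PySem.Set (Int × Int) → List (Int × Int) → List (Int × Int) → List (Int × Int)
  | 0, _, _, border => border
  | fuel + 1, visited, queue, border =>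
    match queue with
    | [] => border
    | p :: rest =>
      let st := pvScanA grid ref (pvNeiA m n p.1 p.2) (0, visited, [])
      pvBfsA grid ref m n fuel st.2.1 (rest ++ st.2.2)
        (if st.1 ≠ 4 then border ++ [p] else border)

def colorBorder (grid : List (List Int)) (r0 : Int) (c0 : Int) (color : Int) : List (List Int) :=
  let m : Int := (grid.length : Int)
  let n : Int := ((PySem.List.pyGetD grid 0 []).length : Int)
  let ref := pvGG grid r0 c0
  let border := pvBfsA grid ref m n (2 * grid.length * (PySem.List.pyGetD grid 0 []).length + 1)
      (PySem.Set.add PySem.Set.empty (r0, c0)) [(r0, c0)] []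
  border.foldl
    (fun g p => PySem.List.pySetD g p.1 (PySem.List.pySetD (PySem.List.pyGetD g p.1 []) p.2 color))
    grid

-- ===== PORT B =====
-- the four neighbour cells, in B's order
def pvDirs (x y : Int) : List (Int × Int) := [(x + 1, y), (x - 1, y), (x, y + 1), (x, y - 1)]

-- `0 <= a < m and 0 <= b < n and grid[a][b] == ref`
def pvGoodB (grid : List (List Int)) (ref m n : Int) (q : Int × Int) : Bool :=
  decide (0 ≤ q.1 ∧ q.1 < m ∧ 0 ≤ q.2 ∧ q.2 < n ∧ pvGG grid q.1 q.2 = ref)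

-- body of the `while stack` loop for one popped cell; state = (comp, stack)
def pvStepB (grid : List (List Int)) (ref m n : Int) (p : Int × Int)
    (st : PySem.Set (Int × Int) × List (Int × Int)) :
    PySem.Set (Int × Int) × List (Int × Int) :=
  (pvDirs p.1 p.2).foldl
    (fun st q =>
      if pvGoodB grid ref m n q = true ∧ q ∉ st.1
      then (PySem.Set.add st.1 q, st.2 ++ [q]) else st) st

-- the flood loop (stack.pop() pops the LAST element); same proven-sufficient fuel bound
def pvDfsB (grid : List (List Int)) (ref m n : Int) :
    Nat → PySem.Set (Int × Int) → List (Int × Int) → PySem.Set (Int × Int)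
  | 0, comp, _ => comp
  | fuel + 1, comp, stack =>
    match PySem.List.pop? stack (-1) with
    | none => comp
    | some (p, stack') =>
      let st := pvStepB grid ref m n p (comp, stack')
      pvDfsB grid ref m n fuel st.1 st.2

-- `is_border`: some neighbour is out of bounds or has a different color
def pvIsBorderB (grid : List (List Int)) (ref m n : Int) (p : Int × Int) : Bool :=
  (pvDirs p.1 p.2).any (fun q => ! pvGoodB grid ref m n q)

def colorBorder_alt (grid : List (List Int)) (r0 : Int) (c0 : Int) (color : Int) : List (List Int) :=
  let m : Int := (grid.length : Int)
  let n : Int := ((PySem.List.pyGetD grid 0 []).length : Int)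
  let ref := pvGG grid r0 c0
  let comp := pvDfsB grid ref m n (2 * grid.length * (PySem.List.pyGetD grid 0 []).length + 1)
      (PySem.Set.add PySem.Set.empty (r0, c0)) [(r0, c0)]
  let border := comp.filter (fun p => pvIsBorderB grid ref m n p)
  border.foldl
    (fun g p => PySem.List.pySetD g p.1 (PySem.List.pySetD (PySem.List.pyGetD g p.1 []) p.2 color))
    grid

-- ===== PRECONDITION & SPEC =====
-- Pre_: a nonempty grid whose rows all have at least the first row's length (only the first
-- len(grid[0]) columns are ever touched) and a start index pair that is in range for Python
-- (negative in-range indices, which wrap, included). Outside it A raises IndexError: on a grid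
-- with a row shorter than row 0 A usually raises, though it may still return when the flood
-- never reaches the short row — those accidental successes (where B returns the same value)
-- are excluded with the whole shorter-row shape.
def Pre_colorBorder (grid : List (List Int)) (r0 : Int) (c0 : Int) (color : Int) : Prop :=
  grid ≠ [] ∧ (∀ row ∈ grid, (grid.headD []).length ≤ row.length) ∧
    -(grid.length : Int) ≤ r0 ∧ r0 < (grid.length : Int) ∧
    -((grid.headD []).length : Int) ≤ c0 ∧ c0 < ((grid.headD []).length : Int)
instance (grid : List (List Int)) (r0 : Int) (c0 : Int) (color : Int) :
    Decidable (Pre_colorBorder grid r0 c0 color) := by unfold Pre_colorBorder; infer_instance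

def pvWitness_colorBorder : List (List Int) × Int × Int × Int := ([[1, 1], [1, 2]], 0, 0, 3)

def Spec_colorBorder (grid : List (List Int)) (r0 : Int) (c0 : Int) (color : Int) (out : List (List Int)) : Prop := out = colorBorder_alt grid r0 c0 color
instance (grid : List (List Int)) (r0 : Int) (c0 : Int) (color : Int) (out : List (List Int)) : Decidable (Spec_colorBorder grid r0 c0 color out) := by unfold Spec_colorBorder; infer_instance

-- ===== CLAIM (what is proved, stated in full; the proofs are below) =====
def Claim_equal_colorBorder : Prop := ∀ (grid : List (List Int)) (r0 : Int) (c0 : Int) (color : Int), Dom_colorBorder grid r0 c0 color → Pre_colorBorder grid r0 c0 color → Spec_colorBorder grid r0 c0 color (colorBorder grid r0 c0 color)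

-- ===== LEMMAS AND PROOFS =====

-- p is an in-bounds cell
def pvInb (m n : Int) (p : Int × Int) : Prop := 0 ≤ p.1 ∧ p.1 < m ∧ 0 ≤ p.2 ∧ p.2 < n

-- q is an in-bounds neighbour of p carrying the reference color
def pvSC (grid : List (List Int)) (ref m n : Int) (p q : Int × Int) : Prop :=
  q ∈ pvDirs p.1 p.2 ∧ pvInb m n q ∧ pvGG grid q.1 q.2 = ref

-- the connected same-color component of the start cell
inductive pvReach (grid : List (List Int)) (ref m n : Int) (s : Int × Int) : Int × Int → Prop
  | base : pvReach grid ref m n s s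
  | step {p q} : pvReach grid ref m n s p → pvSC grid ref m n p q → pvReach grid ref m n s q

-- A's same-color neighbour count for a cell
def pvCnt (grid : List (List Int)) (ref m n : Int) (p : Int × Int) : Nat :=
  (pvNeiA m n p.1 p.2).countP (fun q => decide (pvGG grid q.1 q.2 = ref))

lemma mem_pvNeiA (m n x y : Int) (q : Int × Int) :
    q ∈ pvNeiA m n x y ↔ q ∈ pvDirs x y ∧ pvInb m n q := by
  obtain ⟨q1, q2⟩ := q
  unfold pvNeiA pvDirs pvInb
  norm_num only [List.foldl_cons, List.foldl_nil]
  split_ifs <;>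
    simp only [List.mem_append, List.mem_cons, List.not_mem_nil, Prod.mk.injEq,
      or_false, false_or, false_iff, not_and] <;> omega

lemma pvScanA_spec (grid : List (List Int)) (ref : Int) :
    ∀ (l : List (Int × Int)) (cnt : Int) (V A0 : List (Int × Int)), V.Nodup →
    ∃ new, pvScanA grid ref l (cnt, V, A0) =
        (cnt + ((l.countP (fun q => decide (pvGG grid q.1 q.2 = ref)) : Nat) : Int),
          V ++ new, A0 ++ new) ∧
      (∀ q ∈ new, q ∈ l ∧ pvGG grid q.1 q.2 = ref ∧ q ∉ V) ∧
      (∀ q ∈ l, pvGG grid q.1 q.2 = ref → q ∈ V ++ new) ∧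
      (V ++ new).Nodup := by
  intro l
  induction l with
  | nil =>
    intro cnt V A0 hV
    exact ⟨[], by simp [pvScanA], by simp, by simp, by simpa using hV⟩
  | cons q l ih =>
    intro cnt V A0 hV
    simp only [pvScanA, List.foldl_cons] at ih ⊢
    by_cases hq : pvGG grid q.1 q.2 = ref
    · by_cases hv : q ∈ V
      · obtain ⟨new, heq, hnew, hcov, hnd⟩ := ih (cnt + 1) V A0 hV
        refine ⟨new, ?_, ?_, ?_, hnd⟩
        · rw [if_pos hq, if_pos hv, heq, List.countP_cons_of_pos (by simp [hq])]
          have : ((l.countP (fun q => decide (pvGG grid q.1 q.2 = ref)) + 1 : Nat) : Int)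
              = (l.countP (fun q => decide (pvGG grid q.1 q.2 = ref)) : Nat) + 1 := by
            push_cast; ring
          rw [this]; ring_nf
        · exact fun q' hq' => ⟨List.mem_cons_of_mem _ (hnew q' hq').1, (hnew q' hq').2⟩
        · intro q' hq' hc
          rcases List.mem_cons.1 hq' with rfl | hq'
          · exact List.mem_append_left _ hv
          · exact hcov q' hq' hc
      · have hV' : (V ++ [q]).Nodup :=
          List.Nodup.append hV (List.nodup_singleton q)
            (by intro a ha hb; simp at hb; subst hb; exact hv ha)
        obtain ⟨new, heq, hnew, hcov, hnd⟩ := ih (cnt + 1) (V ++ [q]) (A0 ++ [q]) hV'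
        have hl1 : V ++ [q] ++ new = V ++ q :: new := by simp
        have hl2 : A0 ++ [q] ++ new = A0 ++ q :: new := by simp
        rw [hl1, hl2] at heq
        refine ⟨q :: new, ?_, ?_, ?_, ?_⟩
        · rw [if_pos hq, if_neg hv, PySem.Set.add_of_not_mem hv, heq,
            List.countP_cons_of_pos (by simp [hq])]
          have : ((l.countP (fun q => decide (pvGG grid q.1 q.2 = ref)) + 1 : Nat) : Int)
              = (l.countP (fun q => decide (pvGG grid q.1 q.2 = ref)) : Nat) + 1 := by
            push_cast; ring
          rw [this]; ring_nf
        · intro q' hq'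
          rcases List.mem_cons.1 hq' with rfl | hq'
          · exact ⟨List.mem_cons_self .., hq, hv⟩
          · obtain ⟨h1, h2, h3⟩ := hnew q' hq'
            exact ⟨List.mem_cons_of_mem _ h1, h2, fun hmem => h3 (List.mem_append_left _ hmem)⟩
        · intro q' hq' hc
          rcases List.mem_cons.1 hq' with rfl | hq'
          · simp
          · have := hcov q' hq' hc
            rw [hl1] at this
            exact this
        · rw [hl1] at hnd; exact hnd
    · obtain ⟨new, heq, hnew, hcov, hnd⟩ := ih cnt V A0 hV
      refine ⟨new, ?_, ?_, ?_, hnd⟩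
      · rw [if_neg hq, heq, List.countP_cons_of_neg (by simp [hq])]
      · exact fun q' hq' => ⟨List.mem_cons_of_mem _ (hnew q' hq').1, (hnew q' hq').2⟩
      · intro q' hq' hc
        rcases List.mem_cons.1 hq' with rfl | hq'
        · exact absurd hc hq
        · exact hcov q' hq' hc

lemma pvStepB_spec (grid : List (List Int)) (ref m n : Int) :
    ∀ (l : List (Int × Int)) (V S0 : List (Int × Int)), V.Nodup →
    ∃ new, l.foldl
        (fun st q =>
          if pvGoodB grid ref m n q = true ∧ q ∉ st.1
          then (PySem.Set.add st.1 q, st.2 ++ [q]) else st) (V, S0) =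
        (V ++ new, S0 ++ new) ∧
      (∀ q ∈ new, q ∈ l ∧ pvGoodB grid ref m n q = true ∧ q ∉ V) ∧
      (∀ q ∈ l, pvGoodB grid ref m n q = true → q ∈ V ++ new) ∧
      (V ++ new).Nodup := by
  intro l
  induction l with
  | nil =>
    intro V S0 hV
    exact ⟨[], by simp, by simp, by simp, by simpa using hV⟩
  | cons q l ih =>
    intro V S0 hV
    simp only [List.foldl_cons]
    by_cases hc : pvGoodB grid ref m n q = true ∧ q ∉ V
    · rw [if_pos hc, PySem.Set.add_of_not_mem hc.2]
      have hV' : (V ++ [q]).Nodup :=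
        List.Nodup.append hV (List.nodup_singleton q)
          (by intro a ha hb; simp at hb; subst hb; exact hc.2 ha)
      obtain ⟨new, heq, hnew, hcov, hnd⟩ := ih (V ++ [q]) (S0 ++ [q]) hV'
      have hl1 : V ++ [q] ++ new = V ++ q :: new := by simp
      have hl2 : S0 ++ [q] ++ new = S0 ++ q :: new := by simp
      rw [hl1, hl2] at heq
      refine ⟨q :: new, heq, ?_, ?_, ?_⟩
      · intro q' hq'
        rcases List.mem_cons.1 hq' with rfl | hq'
        · exact ⟨List.mem_cons_self .., hc.1, hc.2⟩
        · obtain ⟨h1, h2, h3⟩ := hnew q' hq'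
          exact ⟨List.mem_cons_of_mem _ h1, h2, fun hmem => h3 (List.mem_append_left _ hmem)⟩
      · intro q' hq' hg
        rcases List.mem_cons.1 hq' with rfl | hq'
        · simp
        · have := hcov q' hq' hg
          rw [hl1] at this
          exact this
      · rw [hl1] at hnd; exact hnd
    · rw [if_neg hc]
      obtain ⟨new, heq, hnew, hcov, hnd⟩ := ih V S0 hV
      refine ⟨new, heq, ?_, ?_, hnd⟩
      · exact fun q' hq' => ⟨List.mem_cons_of_mem _ (hnew q' hq').1, (hnew q' hq').2⟩
      · intro q' hq' hg
        rcases List.mem_cons.1 hq' with rfl | hq'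
        · rcases not_and_or.1 hc with h | h
          · exact absurd hg h
          · exact List.mem_append_left _ (not_not.1 h)
        · exact hcov q' hq' hg

lemma pvLen_le (m n : Int) (s : Int × Int) :
    ∀ V : List (Int × Int), V.Nodup → (∀ p ∈ V, pvInb m n p ∨ p = s) →
    V.length ≤ m.toNat * n.toNat + 1 := by
  intro V hnd hin
  have hsub : V.toFinset ⊆ insert s (Finset.Ico 0 m ×ˢ Finset.Ico 0 n) := by
    intro p hp
    rcases hin p (List.mem_toFinset.1 hp) with h | rfl
    · obtain ⟨h1, h2, h3, h4⟩ := h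
      exact Finset.mem_insert_of_mem
        (by simp [Finset.mem_product, Finset.mem_Ico, h1, h2, h3, h4])
    · exact Finset.mem_insert_self _ _
  calc V.length = V.toFinset.card := (List.toFinset_card_of_nodup hnd).symm
    _ ≤ (insert s (Finset.Ico 0 m ×ˢ Finset.Ico 0 n)).card := Finset.card_le_card hsub
    _ ≤ (Finset.Ico 0 m ×ˢ Finset.Ico 0 n).card + 1 := Finset.card_insert_le _ _
    _ = m.toNat * n.toNat + 1 := by
        rw [Finset.card_product, Int.card_Ico, Int.card_Ico]; simp

lemma pvGoodB_iff (grid : List (List Int)) (ref m n : Int) (q : Int × Int) :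
    pvGoodB grid ref m n q = true ↔ pvInb m n q ∧ pvGG grid q.1 q.2 = ref := by
  simp [pvGoodB, pvInb, and_assoc]

lemma pvClosed_iff (grid : List (List Int)) (ref m n : Int) (s : Int × Int)
    (V : List (Int × Int)) (hsV : s ∈ V)
    (hVR : ∀ p ∈ V, pvReach grid ref m n s p)
    (hcl : ∀ p ∈ V, ∀ q, pvSC grid ref m n p q → q ∈ V) :
    ∀ p, p ∈ V ↔ pvReach grid ref m n s p := by
  intro p
  refine ⟨hVR p, fun h => ?_⟩
  induction h with
  | base => exact hsV
  | step _ h2 ih => exact hcl _ ih _ h2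

lemma pvBfsA_spec (grid : List (List Int)) (ref m n : Int) (s : Int × Int) :
    ∀ (fuel : Nat) (V Q B : List (Int × Int)),
    V.Nodup → Q.Nodup → s ∈ V →
    (∀ p ∈ Q, p ∈ V) →
    (∀ p ∈ V, pvReach grid ref m n s p) →
    (∀ p ∈ V, pvInb m n p ∨ p = s) →
    (∀ p ∈ V, p ∉ Q → ∀ q, pvSC grid ref m n p q → q ∈ V) →
    (∀ p, p ∈ B ↔ p ∈ V ∧ p ∉ Q ∧ pvCnt grid ref m n p ≠ 4) →
    Q.length + 2 * (m.toNat * n.toNat + 1) ≤ fuel + 2 * V.length →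
    ∀ p, p ∈ pvBfsA grid ref m n fuel V Q B ↔
      (pvReach grid ref m n s p ∧ pvCnt grid ref m n p ≠ 4) := by
  intro fuel
  induction fuel with
  | zero =>
    intro V Q B hV hQ hsV hQV hVR hVin hcl hB hfuel p
    have hVle := pvLen_le m n s V hV hVin
    have hQ0 : Q = [] := by
      cases Q with
      | nil => rfl
      | cons a t => exfalso; simp only [List.length_cons] at hfuel; omega
    subst hQ0
    simp only [pvBfsA]
    rw [hB p, pvClosed_iff grid ref m n s V hsV hVR (fun p hp => hcl p hp (by simp)) p]
    simp only [List.not_mem_nil, not_false_iff, true_and]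
  | succ fuel ih =>
    intro V Q B hV hQ hsV hQV hVR hVin hcl hB hfuel p
    cases Q with
    | nil =>
      simp only [pvBfsA]
      rw [hB p, pvClosed_iff grid ref m n s V hsV hVR (fun p hp => hcl p hp (by simp)) p]
      simp only [List.not_mem_nil, not_false_iff, true_and]
    | cons p0 rest =>
      obtain ⟨new, heq, hnew, hcov, hnd⟩ :=
        pvScanA_spec grid ref (pvNeiA m n p0.1 p0.2) 0 V [] hV
      simp only [pvBfsA, heq, List.nil_append]
      have hnewSC : ∀ q ∈ new, pvSC grid ref m n p0 q := by
        intro q hq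
        obtain ⟨h1, h2, _⟩ := hnew q hq
        obtain ⟨hd, hi⟩ := (mem_pvNeiA m n p0.1 p0.2 q).1 h1
        exact ⟨hd, hi, h2⟩
      have hnewV : ∀ q ∈ new, q ∉ V := fun q hq => (hnew q hq).2.2
      have hrestnd : rest.Nodup := (List.nodup_cons.1 hQ).2
      have hp0rest : p0 ∉ rest := (List.nodup_cons.1 hQ).1
      have hp0V : p0 ∈ V := hQV p0 (List.mem_cons_self ..)
      have hnewnd : new.Nodup := (List.nodup_append.1 hnd).2.1
      have hp0B : p0 ∉ B := fun h => ((hB p0).1 h).2.1 (List.mem_cons_self ..)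
      have hp0new : p0 ∉ new := fun h => hnewV p0 h hp0V
      have h2' : (rest ++ new).Nodup :=
        List.Nodup.append hrestnd hnewnd
          (fun a ha hb => hnewV a hb (hQV a (List.mem_cons_of_mem _ ha)))
      have h3' : s ∈ V ++ new := List.mem_append_left _ hsV
      have h4' : ∀ p' ∈ rest ++ new, p' ∈ V ++ new := by
        intro p' hp'
        rcases List.mem_append.1 hp' with h | h
        · exact List.mem_append_left _ (hQV p' (List.mem_cons_of_mem _ h))
        · exact List.mem_append_right _ h
      have h5' : ∀ p' ∈ V ++ new, pvReach grid ref m n s p' := by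
        intro p' hp'
        rcases List.mem_append.1 hp' with h | h
        · exact hVR p' h
        · exact pvReach.step (hVR p0 hp0V) (hnewSC p' h)
      have h6' : ∀ p' ∈ V ++ new, pvInb m n p' ∨ p' = s := by
        intro p' hp'
        rcases List.mem_append.1 hp' with h | h
        · exact hVin p' h
        · exact Or.inl (hnewSC p' h).2.1
      have h7' : ∀ p' ∈ V ++ new, p' ∉ rest ++ new →
          ∀ q, pvSC grid ref m n p' q → q ∈ V ++ new := by
        intro p' hp' hnot q hsc
        rcases List.mem_append.1 hp' with hpV | hpnew
        · by_cases hpp : p' = p0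
          · subst hpp
            have hqn : q ∈ pvNeiA m n p'.1 p'.2 := (mem_pvNeiA m n p'.1 p'.2 q).2 ⟨hsc.1, hsc.2.1⟩
            exact hcov q hqn hsc.2.2
          · have hnQ : p' ∉ p0 :: rest := by
              simp only [List.mem_cons, not_or]
              exact ⟨hpp, fun h => hnot (List.mem_append_left _ h)⟩
            exact List.mem_append_left _ (hcl p' hpV hnQ q hsc)
        · exact absurd (List.mem_append_right _ hpnew) hnot
      have hbound' : (rest ++ new).length + 2 * (m.toNat * n.toNat + 1) ≤
          fuel + 2 * (V ++ new).length := by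
        simp only [List.length_append, List.length_cons] at hfuel ⊢
        omega
      have hcond : ((0 : Int) + ((pvNeiA m n p0.1 p0.2).countP
          (fun q => decide (pvGG grid q.1 q.2 = ref)) : Nat) ≠ 4) ↔
          pvCnt grid ref m n p0 ≠ 4 := by
        unfold pvCnt; omega
      by_cases h4 : pvCnt grid ref m n p0 = 4
      · rw [if_neg (fun hc => (hcond.1 hc) h4)]
        have h8' : ∀ p', p' ∈ B ↔ p' ∈ V ++ new ∧ p' ∉ rest ++ new ∧
            pvCnt grid ref m n p' ≠ 4 := by
          intro p'
          constructor
          · intro hpB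
            obtain ⟨ha, hb, hc⟩ := (hB p').1 hpB
            refine ⟨List.mem_append_left _ ha, ?_, hc⟩
            intro hmem
            rcases List.mem_append.1 hmem with h | h
            · exact hb (List.mem_cons_of_mem _ h)
            · exact hnewV p' h ha
          · rintro ⟨ha, hb, hc⟩
            rcases List.mem_append.1 ha with haV | hanew
            · by_cases hpp : p' = p0
              · subst hpp; exact absurd h4 hc
              · refine (hB p').2 ⟨haV, ?_, hc⟩
                simp only [List.mem_cons, not_or]
                exact ⟨hpp, fun h => hb (List.mem_append_left _ h)⟩
            · exact absurd (List.mem_append_right rest hanew) hb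
        exact ih (V ++ new) (rest ++ new) B hnd h2' h3' h4' h5' h6' h7' h8' hbound' p
      · rw [if_pos (hcond.2 h4)]
        have h8' : ∀ p', p' ∈ B ++ [p0] ↔ p' ∈ V ++ new ∧ p' ∉ rest ++ new ∧
            pvCnt grid ref m n p' ≠ 4 := by
          intro p'
          constructor
          · intro hpB
            rcases List.mem_append.1 hpB with hpB | hp1
            · obtain ⟨ha, hb, hc⟩ := (hB p').1 hpB
              refine ⟨List.mem_append_left _ ha, ?_, hc⟩
              intro hmem
              rcases List.mem_append.1 hmem with h | h
              · exact hb (List.mem_cons_of_mem _ h)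
              · exact hnewV p' h ha
            · have hpe : p' = p0 := by simpa using hp1
              subst hpe
              refine ⟨List.mem_append_left _ hp0V, ?_, h4⟩
              intro hmem
              rcases List.mem_append.1 hmem with h | h
              · exact hp0rest h
              · exact hp0new h
          · rintro ⟨ha, hb, hc⟩
            rcases List.mem_append.1 ha with haV | hanew
            · by_cases hpp : p' = p0
              · subst hpp; exact List.mem_append_right _ (by simp)
              · refine List.mem_append_left _ ((hB p').2 ⟨haV, ?_, hc⟩)
                simp only [List.mem_cons, not_or]
                exact ⟨hpp, fun h => hb (List.mem_append_left _ h)⟩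
            · exact absurd (List.mem_append_right rest hanew) hb
        exact ih (V ++ new) (rest ++ new) (B ++ [p0]) hnd h2' h3' h4' h5' h6' h7' h8' hbound' p

lemma pvDfsB_spec (grid : List (List Int)) (ref m n : Int) (s : Int × Int) :
    ∀ (fuel : Nat) (V S : List (Int × Int)),
    V.Nodup → s ∈ V →
    (∀ p ∈ S, p ∈ V) →
    (∀ p ∈ V, pvReach grid ref m n s p) →
    (∀ p ∈ V, pvInb m n p ∨ p = s) →
    (∀ p ∈ V, p ∉ S → ∀ q, pvSC grid ref m n p q → q ∈ V) →
    S.length + 2 * (m.toNat * n.toNat + 1) ≤ fuel + 2 * V.length →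
    ∀ p, p ∈ pvDfsB grid ref m n fuel V S ↔ pvReach grid ref m n s p := by
  intro fuel
  induction fuel with
  | zero =>
    intro V S hV hsV hSV hVR hVin hcl hfuel p
    have hVle := pvLen_le m n s V hV hVin
    have hS0 : S = [] := by
      cases S with
      | nil => rfl
      | cons a t => exfalso; simp only [List.length_cons] at hfuel; omega
    subst hS0
    simp only [pvDfsB]
    exact pvClosed_iff grid ref m n s V hsV hVR (fun p hp => hcl p hp (by simp)) p
  | succ fuel ih =>
    intro V S hV hsV hSV hVR hVin hcl hfuel p
    rcases List.eq_nil_or_concat S with rfl | ⟨init, p0, hS⟩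
    · have hpop : PySem.List.pop? ([] : List (Int × Int)) (-1) = none := rfl
      simp only [pvDfsB, hpop]
      exact pvClosed_iff grid ref m n s V hsV hVR (fun p hp => hcl p hp (by simp)) p
    · rw [List.concat_eq_append] at hS
      subst hS
      obtain ⟨new, heq, hnew, hcov, hnd⟩ :=
        pvStepB_spec grid ref m n (pvDirs p0.1 p0.2) V init hV
      simp only [pvDfsB, PySem.List.pop?_last, pvStepB, heq]
      have hp0V : p0 ∈ V := hSV p0 (by simp)
      have hnewSC : ∀ q ∈ new, pvSC grid ref m n p0 q := by
        intro q hq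
        obtain ⟨h1, h2, _⟩ := hnew q hq
        obtain ⟨hi, hg⟩ := (pvGoodB_iff grid ref m n q).1 h2
        exact ⟨h1, hi, hg⟩
      have hnewV : ∀ q ∈ new, q ∉ V := fun q hq => (hnew q hq).2.2
      have h3' : s ∈ V ++ new := List.mem_append_left _ hsV
      have h4' : ∀ p' ∈ init ++ new, p' ∈ V ++ new := by
        intro p' hp'
        rcases List.mem_append.1 hp' with h | h
        · exact List.mem_append_left _ (hSV p' (List.mem_append_left _ h))
        · exact List.mem_append_right _ h
      have h5' : ∀ p' ∈ V ++ new, pvReach grid ref m n s p' := by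
        intro p' hp'
        rcases List.mem_append.1 hp' with h | h
        · exact hVR p' h
        · exact pvReach.step (hVR p0 hp0V) (hnewSC p' h)
      have h6' : ∀ p' ∈ V ++ new, pvInb m n p' ∨ p' = s := by
        intro p' hp'
        rcases List.mem_append.1 hp' with h | h
        · exact hVin p' h
        · exact Or.inl (hnewSC p' h).2.1
      have h7' : ∀ p' ∈ V ++ new, p' ∉ init ++ new →
          ∀ q, pvSC grid ref m n p' q → q ∈ V ++ new := by
        intro p' hp' hnot q hsc
        rcases List.mem_append.1 hp' with hpV | hpnew
        · by_cases hpp : p' = p0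
          · subst hpp
            exact hcov q hsc.1 ((pvGoodB_iff grid ref m n q).2 ⟨hsc.2.1, hsc.2.2⟩)
          · have hnS : p' ∉ init ++ [p0] := by
              simp only [List.mem_append, List.mem_singleton, not_or]
              exact ⟨fun h => hnot (List.mem_append_left _ h), hpp⟩
            exact List.mem_append_left _ (hcl p' hpV hnS q hsc)
        · exact absurd (List.mem_append_right _ hpnew) hnot
      have hbound' : (init ++ new).length + 2 * (m.toNat * n.toNat + 1) ≤
          fuel + 2 * (V ++ new).length := by
        simp only [List.length_append, List.length_singleton] at hfuel ⊢
        omega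
      exact ih (V ++ new) (init ++ new) hnd h3' h4' h5' h6' h7' hbound' p

lemma pvNeiA_len_le (m n x y : Int) : (pvNeiA m n x y).length ≤ 4 := by
  unfold pvNeiA
  norm_num only [List.foldl_cons, List.foldl_nil]
  split_ifs <;> simp

lemma pvNeiA_len_eq (m n x y : Int) :
    (pvNeiA m n x y).length = 4 ↔ ∀ q ∈ pvDirs x y, pvInb m n q := by
  unfold pvNeiA pvDirs pvInb
  norm_num only [List.foldl_cons, List.foldl_nil]
  split_ifs <;> simp <;> omega

lemma pvCnt_iff_border (grid : List (List Int)) (ref m n : Int) (p : Int × Int) :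
    pvCnt grid ref m n p ≠ 4 ↔ pvIsBorderB grid ref m n p = true := by
  have hkey : pvCnt grid ref m n p = 4 ↔
      ∀ q ∈ pvDirs p.1 p.2, pvInb m n q ∧ pvGG grid q.1 q.2 = ref := by
    constructor
    · intro h4
      have hcle : pvCnt grid ref m n p ≤ (pvNeiA m n p.1 p.2).length :=
        List.countP_le_length
      have hl4 : (pvNeiA m n p.1 p.2).length = 4 := by
        have := pvNeiA_len_le m n p.1 p.2
        omega
      have hallg := List.countP_eq_length.1 (h4.trans hl4.symm)
      have hinb := (pvNeiA_len_eq m n p.1 p.2).1 hl4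
      intro q hq
      have hiq := hinb q hq
      have hqn : q ∈ pvNeiA m n p.1 p.2 := (mem_pvNeiA m n p.1 p.2 q).2 ⟨hq, hiq⟩
      exact ⟨hiq, by simpa using hallg q hqn⟩
    · intro hall
      have h1 : ∀ q ∈ pvNeiA m n p.1 p.2,
          (fun q => decide (pvGG grid q.1 q.2 = ref)) q = true := by
        intro q hq
        obtain ⟨hd, _⟩ := (mem_pvNeiA m n p.1 p.2 q).1 hq
        simpa using (hall q hd).2
      have h2 : pvCnt grid ref m n p = (pvNeiA m n p.1 p.2).length :=
        List.countP_eq_length.2 h1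
      rw [h2]
      exact (pvNeiA_len_eq m n p.1 p.2).2 (fun q hq => (hall q hq).1)
  rw [Ne, hkey]
  have hgood' : ∀ q, ((!pvGoodB grid ref m n q) = true) ↔
      ¬(pvInb m n q ∧ pvGG grid q.1 q.2 = ref) := by
    intro q
    rw [Bool.not_eq_true', Bool.eq_false_iff, Ne, pvGoodB_iff]
  simp only [pvIsBorderB, List.any_eq_true]
  constructor
  · intro h
    push Not at h
    obtain ⟨q, hq, hbad⟩ := h
    exact ⟨q, hq, (hgood' q).2 (by tauto)⟩
  · rintro ⟨q, hq, hbad⟩ hall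
    exact (hgood' q).1 hbad (hall q hq)

lemma pvReach_inb (grid : List (List Int)) (ref m n : Int) (s p : Int × Int)
    (h : pvReach grid ref m n s p) : pvInb m n p ∨ p = s := by
  induction h with
  | base => exact Or.inr rfl
  | step _ h2 _ => exact Or.inl h2.2.1

-- flat accessor used to compare grids cell by cell
def pvAt (G : List (List Int)) (i j : Nat) : Int := (G.getD i []).getD j 0

lemma pvExt2 (X Y : List (List Int)) (hl : X.length = Y.length)
    (hr : ∀ i, (X.getD i []).length = (Y.getD i []).length)
    (hv : ∀ i j, pvAt X i j = pvAt Y i j) : X = Y := by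
  apply List.ext_getElem hl
  intro i h1 h2
  apply List.ext_getElem
  · have := hr i
    rwa [List.getD_eq_getElem _ _ h1, List.getD_eq_getElem _ _ h2] at this
  · intro j hj1 hj2
    have := hv i j
    unfold pvAt at this
    rwa [List.getD_eq_getElem _ _ h1, List.getD_eq_getElem _ _ h2,
      List.getD_eq_getElem _ _ hj1, List.getD_eq_getElem _ _ hj2] at this

-- Python index normalization for an in-range (possibly negative) index
def pvIdx (len : Nat) (i : Int) : Nat := if 0 ≤ i then i.toNat else len - (-i).toNat

-- the cell actually addressed by `grid[x][y] = color`
def pvEff (G : List (List Int)) (p : Int × Int) : Nat × Nat :=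
  (pvIdx G.length p.1, pvIdx (G.getD (pvIdx G.length p.1) []).length p.2)

lemma pvIdx_nonneg (len : Nat) (i : Int) (h : 0 ≤ i) : pvIdx len i = i.toNat := by
  unfold pvIdx; rw [if_pos h]

lemma pvIdx_lt (len : Nat) (i : Int) (h2 : i < (len : Int))
    (h0 : 0 < len) : pvIdx len i < len := by
  unfold pvIdx; split_ifs <;> omega

lemma pvSetD_inRange {α : Type} (xs : List α) (i : Int) (v : α)
    (h1 : -(xs.length : Int) ≤ i) (h2 : i < (xs.length : Int)) :
    PySem.List.pySetD xs i v = xs.set (pvIdx xs.length i) v := by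
  unfold pvIdx
  by_cases h : 0 ≤ i
  · simp [PySem.List.pySetD, PySem.List.pySet?, PySem.List.pyIdx?, h, h2]
  · simp [PySem.List.pySetD, PySem.List.pySet?, PySem.List.pyIdx?, h, h1]

lemma pvGetD_inRange {α : Type} (xs : List α) (i : Int) (d : α)
    (h1 : -(xs.length : Int) ≤ i) (h2 : i < (xs.length : Int)) :
    PySem.List.pyGetD xs i d = xs.getD (pvIdx xs.length i) d := by
  by_cases h : 0 ≤ i
  · rw [pvIdx_nonneg _ _ h, PySem.List.pyGetD_eq_getElem xs d h h2,
      List.getD_eq_getElem _ _ (by omega)]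
  · obtain ⟨k, rfl⟩ : ∃ k : Nat, i = -(k : Int) := ⟨(-i).toNat, by omega⟩
    have e : pvIdx xs.length (-(k : Int)) = xs.length - k := by
      unfold pvIdx
      rw [if_neg h]
      congr 1
      omega
    rw [e, PySem.List.pyGetD_neg_natCast xs k d (by omega) (by omega),
      List.getD_eq_getElem _ _ (by omega)]

-- one in-place write `grid[x][y] = color` (Python indexing: negatives wrap)
lemma pvWrite_spec (color : Int) (G : List (List Int)) (p : Int × Int)
    (hp1 : -(G.length : Int) ≤ p.1) (hp2 : p.1 < (G.length : Int))
    (hp3 : -((G.getD (pvIdx G.length p.1) []).length : Int) ≤ p.2)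
    (hp4 : p.2 < ((G.getD (pvIdx G.length p.1) []).length : Int)) :
    (PySem.List.pySetD G p.1 (PySem.List.pySetD (PySem.List.pyGetD G p.1 []) p.2 color)).length
        = G.length ∧
    (∀ i : Nat, ((PySem.List.pySetD G p.1
        (PySem.List.pySetD (PySem.List.pyGetD G p.1 []) p.2 color)).getD i []).length
        = (G.getD i []).length) ∧
    (∀ i j : Nat, pvAt (PySem.List.pySetD G p.1
        (PySem.List.pySetD (PySem.List.pyGetD G p.1 []) p.2 color)) i j
        = if (i, j) = pvEff G p then color else pvAt G i j) := by
  have h0 : 0 < G.length := by omega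
  have haL : pvIdx G.length p.1 < G.length := pvIdx_lt _ _ hp2 h0
  have hbL : pvIdx (G.getD (pvIdx G.length p.1) []).length p.2
      < (G.getD (pvIdx G.length p.1) []).length := pvIdx_lt _ _ hp4 (by omega)
  have hrw : PySem.List.pySetD G p.1
      (PySem.List.pySetD (PySem.List.pyGetD G p.1 []) p.2 color) =
      G.set (pvIdx G.length p.1) ((G.getD (pvIdx G.length p.1) []).set
        (pvIdx (G.getD (pvIdx G.length p.1) []).length p.2) color) := by
    rw [pvGetD_inRange G p.1 [] hp1 hp2, pvSetD_inRange _ _ _ hp3 hp4,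
      pvSetD_inRange _ _ _ hp1 hp2]
  rw [hrw]
  have hrow : ∀ i : Nat,
      (G.set (pvIdx G.length p.1) ((G.getD (pvIdx G.length p.1) []).set
        (pvIdx (G.getD (pvIdx G.length p.1) []).length p.2) color)).getD i [] =
      if i = pvIdx G.length p.1 then
        (G.getD (pvIdx G.length p.1) []).set
          (pvIdx (G.getD (pvIdx G.length p.1) []).length p.2) color
      else G.getD i [] := by
    intro i
    by_cases hi : i = pvIdx G.length p.1
    · subst hi
      simp [List.getD_eq_getElem?_getD, haL]
    · simp [List.getD_eq_getElem?_getD, Ne.symm hi, hi]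
  refine ⟨by simp, ?_, ?_⟩
  · intro i
    rw [hrow i]
    by_cases hi : i = pvIdx G.length p.1
    · rw [if_pos hi, List.length_set, hi]
    · rw [if_neg hi]
  · intro i j
    unfold pvAt pvEff
    rw [hrow i]
    have hbL2 : pvIdx (G[pvIdx G.length p.1]?.getD []).length p.2
        < (G[pvIdx G.length p.1]?.getD []).length := by
      simpa [List.getD_eq_getElem?_getD] using hbL
    by_cases hi : i = pvIdx G.length p.1
    · rw [if_pos hi]
      subst hi
      by_cases hj : j = pvIdx (G.getD (pvIdx G.length p.1) []).length p.2
      · subst hj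
        rw [if_pos rfl]
        simp [List.getD_eq_getElem?_getD, hbL2]
      · have hj2 : ¬j = pvIdx (G[pvIdx G.length p.1]?.getD []).length p.2 := by
          simpa [List.getD_eq_getElem?_getD] using hj
        rw [if_neg (by simp [Prod.mk.injEq, hj2])]
        simp [List.getD_eq_getElem?_getD, Ne.symm hj2]
    · rw [if_neg hi, if_neg (by simp [Prod.mk.injEq, hi])]

lemma pvFoldWrite_spec (color : Int) :
    ∀ (L : List (Int × Int)) (G : List (List Int)),
    (∀ p ∈ L, -(G.length : Int) ≤ p.1 ∧ p.1 < (G.length : Int) ∧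
      -((G.getD (pvIdx G.length p.1) []).length : Int) ≤ p.2 ∧
      p.2 < ((G.getD (pvIdx G.length p.1) []).length : Int)) →
    (L.foldl (fun g p => PySem.List.pySetD g p.1
        (PySem.List.pySetD (PySem.List.pyGetD g p.1 []) p.2 color)) G).length = G.length ∧
    (∀ i : Nat, ((L.foldl (fun g p => PySem.List.pySetD g p.1
        (PySem.List.pySetD (PySem.List.pyGetD g p.1 []) p.2 color)) G).getD i []).length
        = (G.getD i []).length) ∧
    (∀ i j : Nat, pvAt (L.foldl (fun g p => PySem.List.pySetD g p.1
        (PySem.List.pySetD (PySem.List.pyGetD g p.1 []) p.2 color)) G) i j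
        = if (i, j) ∈ L.map (pvEff G) then color else pvAt G i j) := by
  intro L
  induction L with
  | nil => intro G _; exact ⟨rfl, fun _ => rfl, fun i j => by simp⟩
  | cons p L ih =>
    intro G hhyp
    obtain ⟨hp1, hp2, hp3, hp4⟩ := hhyp p (List.mem_cons_self ..)
    obtain ⟨hw1, hw2, hw3⟩ := pvWrite_spec color G p hp1 hp2 hp3 hp4
    have hEffEq : ∀ q : Int × Int, pvEff (PySem.List.pySetD G p.1
        (PySem.List.pySetD (PySem.List.pyGetD G p.1 []) p.2 color)) q = pvEff G q := by
      intro q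
      unfold pvEff
      rw [hw1, hw2]
    have hhyp' : ∀ q ∈ L, -((PySem.List.pySetD G p.1
          (PySem.List.pySetD (PySem.List.pyGetD G p.1 []) p.2 color)).length : Int) ≤ q.1 ∧
        q.1 < ((PySem.List.pySetD G p.1
          (PySem.List.pySetD (PySem.List.pyGetD G p.1 []) p.2 color)).length : Int) ∧
        -(((PySem.List.pySetD G p.1
          (PySem.List.pySetD (PySem.List.pyGetD G p.1 []) p.2 color)).getD
            (pvIdx (PySem.List.pySetD G p.1
              (PySem.List.pySetD (PySem.List.pyGetD G p.1 []) p.2 color)).length q.1) []).length : Int) ≤ q.2 ∧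
        q.2 < (((PySem.List.pySetD G p.1
          (PySem.List.pySetD (PySem.List.pyGetD G p.1 []) p.2 color)).getD
            (pvIdx (PySem.List.pySetD G p.1
              (PySem.List.pySetD (PySem.List.pyGetD G p.1 []) p.2 color)).length q.1) []).length : Int) := by
      intro q hq
      obtain ⟨h1, h2, h3, h4⟩ := hhyp q (List.mem_cons_of_mem _ hq)
      rw [hw1, hw2]
      exact ⟨h1, h2, h3, h4⟩
    obtain ⟨ih1, ih2, ih3⟩ := ih _ hhyp'
    simp only [List.foldl_cons]
    refine ⟨ih1.trans hw1, fun i => (ih2 i).trans (hw2 i), fun i j => ?_⟩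
    rw [ih3 i j]
    have hmap : L.map (pvEff (PySem.List.pySetD G p.1
        (PySem.List.pySetD (PySem.List.pyGetD G p.1 []) p.2 color))) = L.map (pvEff G) :=
      List.map_congr_left fun q _ => hEffEq q
    rw [hmap, hw3 i j]
    by_cases h1 : (i, j) ∈ L.map (pvEff G) <;>
      by_cases h2 : (i, j) = pvEff G p <;>
      simp [List.map_cons, h1, h2]

-- ===== VERDICT (by name: the statement is the Claim_ definition above) =====
theorem colorBorder_spec : Claim_equal_colorBorder := by
  unfold Claim_equal_colorBorder
  intro grid r0 c0 color _ hPre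
  obtain ⟨hne, hrect, hr0, hr1, hc0, hc1⟩ := hPre
  unfold Spec_colorBorder
  simp only [colorBorder, colorBorder_alt]
  have hlenpos : 0 < grid.length := by
    cases grid with
    | nil => exact absurd rfl hne
    | cons a t => simp
  have hrow0 : PySem.List.pyGetD grid 0 [] = grid.headD [] := by
    rw [PySem.List.pyGetD_zero]
    cases grid with
    | nil => exact absurd rfl hne
    | cons a t => rfl
  have hinit : PySem.Set.add (PySem.Set.empty) ((r0, c0) : Int × Int) = [(r0, c0)] := by
    simp [PySem.Set.add, PySem.Set.empty, PySem.Set.contains]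
  rw [hinit]
  have hc0' : -((PySem.List.pyGetD grid 0 []).length : Int) ≤ c0 := by rw [hrow0]; exact hc0
  have hc1' : c0 < ((PySem.List.pyGetD grid 0 []).length : Int) := by rw [hrow0]; exact hc1
  have hA := pvBfsA_spec grid (pvGG grid r0 c0) (grid.length : Int)
    ((PySem.List.pyGetD grid 0 []).length : Int) (r0, c0)
    (2 * grid.length * (PySem.List.pyGetD grid 0 []).length + 1)
    [(r0, c0)] [(r0, c0)] []
    (by simp) (by simp) (by simp) (by simp)
    (by intro p hp; simp at hp; subst hp; exact pvReach.base)
    (by intro p hp; simp at hp; subst hp; exact Or.inr rfl)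
    (by intro p hp hnp; simp at hp; subst hp; simp at hnp)
    (by intro p; simp only [List.not_mem_nil, false_iff]; rintro ⟨h1, h2, _⟩; exact h2 h1)
    (by
      have e1 : ((grid.length : Int)).toNat = grid.length := by omega
      have e2 : (((PySem.List.pyGetD grid 0 []).length : Int)).toNat
          = (PySem.List.pyGetD grid 0 []).length := by omega
      have e3 : 2 * grid.length * (PySem.List.pyGetD grid 0 []).length
          = 2 * (grid.length * (PySem.List.pyGetD grid 0 []).length) := by ring
      simp only [List.length_cons, List.length_nil, e1, e2]
      omega)
  have hC := pvDfsB_spec grid (pvGG grid r0 c0) (grid.length : Int)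
    ((PySem.List.pyGetD grid 0 []).length : Int) (r0, c0)
    (2 * grid.length * (PySem.List.pyGetD grid 0 []).length + 1)
    [(r0, c0)] [(r0, c0)]
    (by simp) (by simp) (by simp)
    (by intro p hp; simp at hp; subst hp; exact pvReach.base)
    (by intro p hp; simp at hp; subst hp; exact Or.inr rfl)
    (by intro p hp hnp; simp at hp; subst hp; simp at hnp)
    (by
      have e1 : ((grid.length : Int)).toNat = grid.length := by omega
      have e2 : (((PySem.List.pyGetD grid 0 []).length : Int)).toNat
          = (PySem.List.pyGetD grid 0 []).length := by omega
      have e3 : 2 * grid.length * (PySem.List.pyGetD grid 0 []).length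
          = 2 * (grid.length * (PySem.List.pyGetD grid 0 []).length) := by ring
      simp only [List.length_cons, List.length_nil, e1, e2]
      omega)
  have hrowlen : ∀ i : Nat, i < grid.length →
      (PySem.List.pyGetD grid 0 []).length ≤ (grid.getD i []).length := by
    intro i hi
    rw [List.getD_eq_getElem _ _ hi, hrow0]
    exact hrect _ (List.getElem_mem hi)
  have hbnds : ∀ p : Int × Int, pvReach grid (pvGG grid r0 c0) (grid.length : Int)
      ((PySem.List.pyGetD grid 0 []).length : Int) (r0, c0) p →
      -(grid.length : Int) ≤ p.1 ∧ p.1 < (grid.length : Int) ∧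
      -((grid.getD (pvIdx grid.length p.1) []).length : Int) ≤ p.2 ∧
      p.2 < ((grid.getD (pvIdx grid.length p.1) []).length : Int) := by
    intro p hR
    rcases pvReach_inb _ _ _ _ _ _ hR with hib | rfl
    · obtain ⟨h1, h2, h3, h4⟩ := hib
      have ha : pvIdx grid.length p.1 = p.1.toNat := pvIdx_nonneg _ _ h1
      have hlr := hrowlen p.1.toNat (by omega)
      rw [ha]
      refine ⟨by omega, h2, by omega, by omega⟩
    · dsimp only
      have haL : pvIdx grid.length r0 < grid.length := pvIdx_lt _ _ hr1 hlenpos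
      have hlr := hrowlen _ haL
      exact ⟨hr0, hr1, by omega, by omega⟩
  have hbndA : ∀ p ∈ pvBfsA grid (pvGG grid r0 c0) (grid.length : Int)
      ((PySem.List.pyGetD grid 0 []).length : Int)
      (2 * grid.length * (PySem.List.pyGetD grid 0 []).length + 1)
      [(r0, c0)] [(r0, c0)] [],
      -(grid.length : Int) ≤ p.1 ∧ p.1 < (grid.length : Int) ∧
      -((grid.getD (pvIdx grid.length p.1) []).length : Int) ≤ p.2 ∧
      p.2 < ((grid.getD (pvIdx grid.length p.1) []).length : Int) :=
    fun p hp => hbnds p ((hA p).1 hp).1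
  have hbndB : ∀ p ∈ (pvDfsB grid (pvGG grid r0 c0) (grid.length : Int)
      ((PySem.List.pyGetD grid 0 []).length : Int)
      (2 * grid.length * (PySem.List.pyGetD grid 0 []).length + 1)
      [(r0, c0)] [(r0, c0)]).filter (fun p => pvIsBorderB grid (pvGG grid r0 c0)
        (grid.length : Int) ((PySem.List.pyGetD grid 0 []).length : Int) p),
      -(grid.length : Int) ≤ p.1 ∧ p.1 < (grid.length : Int) ∧
      -((grid.getD (pvIdx grid.length p.1) []).length : Int) ≤ p.2 ∧
      p.2 < ((grid.getD (pvIdx grid.length p.1) []).length : Int) :=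
    fun p hp => hbnds p ((hC p).1 (List.mem_filter.1 hp).1)
  obtain ⟨hfa1, hfa2, hfa3⟩ := pvFoldWrite_spec color _ grid hbndA
  obtain ⟨hfb1, hfb2, hfb3⟩ := pvFoldWrite_spec color _ grid hbndB
  have hset : ∀ p : Int × Int,
      p ∈ pvBfsA grid (pvGG grid r0 c0) (grid.length : Int)
        ((PySem.List.pyGetD grid 0 []).length : Int)
        (2 * grid.length * (PySem.List.pyGetD grid 0 []).length + 1)
        [(r0, c0)] [(r0, c0)] [] ↔
      p ∈ (pvDfsB grid (pvGG grid r0 c0) (grid.length : Int)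
        ((PySem.List.pyGetD grid 0 []).length : Int)
        (2 * grid.length * (PySem.List.pyGetD grid 0 []).length + 1)
        [(r0, c0)] [(r0, c0)]).filter (fun p => pvIsBorderB grid (pvGG grid r0 c0)
          (grid.length : Int) ((PySem.List.pyGetD grid 0 []).length : Int) p) := by
    intro p
    rw [hA p, List.mem_filter, hC p,
      pvCnt_iff_border grid (pvGG grid r0 c0) (grid.length : Int)
        ((PySem.List.pyGetD grid 0 []).length : Int) p]
  apply pvExt2
  · rw [hfa1, hfb1]
  · intro i
    rw [hfa2 i, hfb2 i]
  · intro i j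
    rw [hfa3 i j, hfb3 i j]
    refine if_congr ?_ rfl rfl
    simp only [List.mem_map]
    exact ⟨fun ⟨p, hp, he⟩ => ⟨p, (hset p).1 hp, he⟩,
      fun ⟨p, hp, he⟩ => ⟨p, (hset p).2 hp, he⟩⟩
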